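-- pv_equiv track=rewrite | github.com/EdwardG5/tempCrossword | preprocessWordList.py | extractAllPatterns
-- ===== SOURCE A (Python) =====
-- import itertools
--
-- def extractAllPatterns(word, length):
-- 	# Explode into chars
-- 	l = list(word)
-- 	# Create options list
-- 	for x in range(length):
-- 		l[x] = [l[x], '-']
-- 	# Create patterns
-- 	patterns = list(itertools.product(*l))
-- 	# Simplify to strings
-- 	length = len(patterns)
-- 	for x in range(length):
-- 		patterns[x] = "".join(patterns[x])
-- 	# Return
-- 	return patterns
-- ===== SOURCE B (Python) =====
-- def extractAllPatterns(word, length):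
--     n = max(length, 0)
--     tail = word[n:]
--     return ["".join('-' if (k >> (n - 1 - i)) & 1 else word[i] for i in range(n)) + tail
--             for k in range(1 << n)]
-- ===== Notes on version B (the rewrite author's own statement) =====
-- stated objective: alternative
-- what changed: Replaces the mutate-a-cell-list + itertools.product pipeline by direct rank enumeration: for each k in range(1 << n) the k-th pattern is decoded from the bits of k (set bit = dash at that position), with the unmodified tail appended.
import Mathlib
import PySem

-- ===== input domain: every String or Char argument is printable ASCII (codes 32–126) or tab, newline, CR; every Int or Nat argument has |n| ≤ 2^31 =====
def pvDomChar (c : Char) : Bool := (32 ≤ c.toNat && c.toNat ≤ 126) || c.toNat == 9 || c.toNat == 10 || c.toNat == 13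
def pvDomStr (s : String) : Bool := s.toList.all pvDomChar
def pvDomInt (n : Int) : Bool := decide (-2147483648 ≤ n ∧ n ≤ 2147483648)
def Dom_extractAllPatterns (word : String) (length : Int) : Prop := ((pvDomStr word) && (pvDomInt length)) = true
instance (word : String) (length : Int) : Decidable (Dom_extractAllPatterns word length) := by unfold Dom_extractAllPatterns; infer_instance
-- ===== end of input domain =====

-- B enumerates the patterns directly by rank: the k-th output is decoded from the bits of k
-- (bit = dash), instead of A's mutate-cells + itertools.product pipeline (objective: alternative).

-- ===== PORT A =====
-- Each cell of Python's `l` is represented by its list of candidate characters: a still-untouched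
-- cell (a 1-char string, iterated by product as one char) is [c]; after the mutation l[x] = [l[x], '-']
-- it is [c, '-'].  pvMutStep is one iteration of `for x in range(length): l[x] = [l[x], '-']`
-- (the `none` branch is Python's IndexError, excluded by Pre_).
def pvMutStep (l : List (List Char)) (x : Int) : List (List Char) :=
  match PySem.List.pyGet? l x with
  | some cell => PySem.List.pySetD l x [cell.headD '-', '-']
  | none => l

-- itertools.product(*l): leftmost position varies slowest, per position in cell order.
def pvProd : List (List Char) → List (List Char)
  | [] => [[]]
  | cell :: rest => cell.flatMap (fun c => (pvProd rest).map (fun t => c :: t))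

def extractAllPatterns (word : String) (length : Int) : List String :=
  -- l = list(word); for x in range(length): l[x] = [l[x], '-']
  let l := (PySem.List.pyRange 0 length 1).foldl pvMutStep (word.toList.map (fun c => [c]))
  -- patterns = list(itertools.product(*l)); then the in-place "".join loop = a map to strings
  (pvProd l).map String.ofList

-- ===== PORT B =====
-- Source B: n = max(length, 0); tail = word[n:]; for each rank k in range(1 << n) build the string
-- whose position i is '-' iff bit (n-1-i) of k is set, else word[i], then append the tail.
-- `1 << n` is ported as 2 ^ n; `word[n:]` with n ≥ 0 is exactly List.drop n; `word[i]` is read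
-- with getD (exact inside Pre_, where i < n ≤ len(word)).
def extractAllPatterns_alt (word : String) (length : Int) : List String :=
  let n := (max length 0).toNat
  let tail := word.toList.drop n
  (List.range (2 ^ n)).map (fun k =>
    String.ofList (((List.range n).map (fun i =>
      if (k >>> (n - 1 - i)) % 2 = 1 then '-' else word.toList.getD i '-')) ++ tail))

-- ===== PRECONDITION & SPEC =====
-- A raises IndexError (l[x] with x ≥ len(word)) exactly when length > len(word); only those inputs are excluded.
def Pre_extractAllPatterns (word : String) (length : Int) : Prop :=
  length ≤ PySem.Str.len word
instance (word : String) (length : Int) : Decidable (Pre_extractAllPatterns word length) := by unfold Pre_extractAllPatterns; infer_instance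

def pvWitness_extractAllPatterns : String × Int := ("ab", 1)

def Spec_extractAllPatterns (word : String) (length : Int) (out : List String) : Prop := out = extractAllPatterns_alt word length
instance (word : String) (length : Int) (out : List String) : Decidable (Spec_extractAllPatterns word length out) := by unfold Spec_extractAllPatterns; infer_instance

-- ===== CLAIM (what is proved, stated in full; the proofs are below) =====
def Claim_equal_extractAllPatterns : Prop := ∀ (word : String) (length : Int), Dom_extractAllPatterns word length → Pre_extractAllPatterns word length → Spec_extractAllPatterns word length (extractAllPatterns word length)

-- ===== LEMMAS AND PROOFS =====

-- The option list A's mutation loop produces: the first m cells are [c, '-'], the rest [c].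
def pvSpecCells : List Char → Nat → List (List Char)
  | [], _ => []
  | c :: cs, 0 => [c] :: pvSpecCells cs 0
  | c :: cs, m + 1 => [c, '-'] :: pvSpecCells cs m

theorem pvSpecCells_zero (cs : List Char) : pvSpecCells cs 0 = cs.map (fun c => [c]) := by
  induction cs with
  | nil => rfl
  | cons c cs ih => simp [pvSpecCells, ih]

theorem pvSpecCells_getElem? (cs : List Char) (m k : Nat) (hk : k < cs.length) :
    (pvSpecCells cs m)[k]? = some (if k < m then [cs[k], '-'] else [cs[k]]) := by
  induction cs generalizing m k with
  | nil => simp at hk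
  | cons c cs ih =>
    cases m with
    | zero =>
      cases k with
      | zero => simp [pvSpecCells]
      | succ k =>
        simp only [pvSpecCells, List.getElem?_cons_succ]
        rw [ih 0 k (by simpa using hk)]
        simp
    | succ m =>
      cases k with
      | zero => simp [pvSpecCells]
      | succ k =>
        simp only [pvSpecCells, List.getElem?_cons_succ]
        rw [ih m k (by simpa using hk)]
        simp

theorem pvSpecCells_set (cs : List Char) (m : Nat) (hm : m < cs.length) :
    pvSpecCells cs (m + 1) = (pvSpecCells cs m).set m [cs[m], '-'] := by
  induction cs generalizing m with
  | nil => simp at hm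
  | cons c cs ih =>
    cases m with
    | zero => simp [pvSpecCells, pvSpecCells_zero]
    | succ m => simp [pvSpecCells, ih m (by simpa using hm)]

-- A's mutation loop over range(length) produces exactly pvSpecCells.
theorem pvCells_eq (cs : List Char) (M : Nat) (hM : M ≤ cs.length) :
    (PySem.List.pyRange 0 (M : Int) 1).foldl pvMutStep (cs.map (fun c => [c]))
      = pvSpecCells cs M := by
  induction M with
  | zero => simp [pvSpecCells_zero]
  | succ M ih =>
    have hM' : M ≤ cs.length := Nat.le_of_succ_le hM
    rw [show ((M + 1 : Nat) : Int) = (M : Int) + 1 by push_cast; ring,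
        PySem.List.pyRange_one_succ_right (by positivity), List.foldl_append, ih hM']
    have hlt : M < cs.length := hM
    simp only [List.foldl_cons, List.foldl_nil, pvMutStep]
    rw [show PySem.List.pyGet? (pvSpecCells cs M) (M : Int)
          = (pvSpecCells cs M)[M]? from PySem.List.pyGet?_natCast _ _]
    rw [pvSpecCells_getElem? cs M M (by omega), if_neg (lt_irrefl M)]
    simp only [List.headD_cons, PySem.List.pySetD_natCast]
    rw [← pvSpecCells_set cs M hlt]

-- The rank-k pattern B builds (the body of B's outer map).
def pvRankPat (cs : List Char) (m k : Nat) : List Char :=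
  ((List.range m).map (fun i =>
    if (k >>> (m - 1 - i)) % 2 = 1 then '-' else cs.getD i '-')) ++ cs.drop m

theorem pv_shift_of_lt (m k : Nat) (h : k < 2 ^ m) : k >>> m = 0 := by
  rw [Nat.shiftRight_eq_div_pow]
  exact Nat.div_eq_of_lt h

theorem pv_shift_top (m k : Nat) (h : k < 2 ^ m) : ((2 ^ m + k) >>> m) % 2 = 1 := by
  rw [Nat.shiftRight_eq_div_pow]
  have : (2 ^ m + k) / 2 ^ m = 1 + k / 2 ^ m := by
    rw [show 2 ^ m + k = 2 ^ m * 1 + k by ring, Nat.mul_add_div (by positivity)]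
  rw [this, Nat.div_eq_of_lt h]

theorem pv_shift_low (m k s : Nat) (hs : s < m) :
    ((2 ^ m + k) >>> s) % 2 = (k >>> s) % 2 := by
  rw [Nat.shiftRight_eq_div_pow, Nat.shiftRight_eq_div_pow]
  have h1 : 2 ^ m = 2 ^ s * 2 ^ (m - s) := by
    rw [← pow_add]; congr 1; omega
  rw [h1, Nat.mul_add_div (by positivity)]
  have h2 : 2 ^ (m - s) = 2 * 2 ^ (m - s - 1) := by
    rw [← pow_succ']; congr 1; omega
  rw [h2]
  omega

theorem pvRankPat_cons_low (c : Char) (cs : List Char) (m k : Nat) (hk : k < 2 ^ m) :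
    pvRankPat (c :: cs) (m + 1) k = c :: pvRankPat cs m k := by
  unfold pvRankPat
  rw [List.range_succ_eq_map]
  simp only [List.map_cons, List.map_map, Function.comp_def, List.drop_succ_cons]
  rw [show m + 1 - 1 - 0 = m from rfl, pv_shift_of_lt m k hk]
  simp only [Nat.zero_mod, List.getD_cons_zero, List.cons_append]
  norm_num
  intro i _
  have : m - (i + 1) = m - 1 - i := by omega
  simp [this]

theorem pvRankPat_cons_high (c : Char) (cs : List Char) (m k : Nat) (hk : k < 2 ^ m) :
    pvRankPat (c :: cs) (m + 1) (2 ^ m + k) = '-' :: pvRankPat cs m k := by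
  unfold pvRankPat
  rw [List.range_succ_eq_map]
  simp only [List.map_cons, List.map_map, Function.comp_def, List.drop_succ_cons]
  rw [show m + 1 - 1 - 0 = m from rfl, pv_shift_top m k hk]
  simp only [List.cons_append]
  norm_num
  intro i hi
  have h1 : m - (i + 1) = m - 1 - i := by omega
  have h2 : m - 1 - i < m := by omega
  simp [h1, pv_shift_low m k _ h2]

theorem pvProd_zero (cs : List Char) : pvProd (pvSpecCells cs 0) = [cs] := by
  induction cs with
  | nil => rfl
  | cons c cs ih => simp [pvSpecCells, pvProd, ih]

-- itertools.product over A's cells = B's rank enumeration.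
theorem pvProd_eq_rank (cs : List Char) (m : Nat) (hm : m ≤ cs.length) :
    pvProd (pvSpecCells cs m) = (List.range (2 ^ m)).map (pvRankPat cs m) := by
  induction m generalizing cs with
  | zero =>
    rw [pvProd_zero]
    simp [pvRankPat]
  | succ m ih =>
    cases cs with
    | nil => simp at hm
    | cons c cs =>
      have hm' : m ≤ cs.length := by simpa using Nat.le_of_succ_le_succ hm
      have hP := ih cs hm'
      simp only [pvSpecCells, pvProd, List.flatMap_cons, List.flatMap_nil,
        List.append_nil, hP, List.map_map]
      rw [show 2 ^ (m + 1) = 2 ^ m + 2 ^ m by ring, List.range_add, List.map_append,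
        List.map_map]
      congr 1
      · exact List.map_congr_left (fun k hk =>
          (pvRankPat_cons_low c cs m k (List.mem_range.mp hk)).symm)
      · exact List.map_congr_left (fun k hk => by
          have := pvRankPat_cons_high c cs m k (List.mem_range.mp hk)
          simp [this])

-- ===== VERDICT (by name: the statement is the Claim_ definition above) =====
theorem extractAllPatterns_spec : Claim_equal_extractAllPatterns := by
  intro word length _ hpre
  simp only [Spec_extractAllPatterns, extractAllPatterns, extractAllPatterns_alt]
  have hlen : length ≤ (word.toList.length : Int) := by
    simpa [PySem.Str.len_eq] using hpre
  have hM : length.toNat ≤ word.toList.length := by omega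
  have hn : (max length 0).toNat = length.toNat := by omega
  have hrange : PySem.List.pyRange 0 length 1 = PySem.List.pyRange 0 (length.toNat : Int) 1 := by
    by_cases h : 0 ≤ length
    · rw [Int.toNat_of_nonneg h]
    · rw [PySem.List.pyRange_one_eq_nil (by omega), PySem.List.pyRange_one_eq_nil (by omega)]
  rw [hn, hrange, pvCells_eq word.toList length.toNat hM,
    pvProd_eq_rank word.toList length.toNat hM, List.map_map]
  rfl
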